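-- pv_equiv track=rewrite | github.com/ckiplab/ckiptagger | src/api.py | _get_word_sentence_from_seq_sentence
-- ===== SOURCE A (Python) =====
-- def _get_word_sentence_from_seq_sentence(sentence, seq_sentence):
--     assert len(sentence) == len(seq_sentence)
--     if not sentence:
--         return []
--
--     word_sentence = []
--     word = sentence[0]
--     for character, label in zip(sentence[1:], seq_sentence[1:]):
--         if label == "B":
--             word_sentence.append(word)
--             word = ""
--         word += character
--     word_sentence.append(word)
--
--     return word_sentence
-- ===== SOURCE B (Python) =====
-- def _get_word_sentence_from_seq_sentence(sentence, seq_sentence):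
--     assert len(sentence) == len(seq_sentence)
--     if not sentence:
--         return []
--     n = len(sentence)
--     cuts = [0] + [i for i in range(1, n) if seq_sentence[i] == "B"] + [n]
--     return [sentence[cuts[k]:cuts[k+1]] for k in range(len(cuts) - 1)]
-- ===== Notes on version B (the rewrite author's own statement) =====
-- stated objective: alternative
-- what changed: Replaces per-character accumulation with a concatenating loop state by a two-phase pass: first collect the boundary indices where the label is 'B', then build each word as one slice between consecutive boundaries.
import Mathlib
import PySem

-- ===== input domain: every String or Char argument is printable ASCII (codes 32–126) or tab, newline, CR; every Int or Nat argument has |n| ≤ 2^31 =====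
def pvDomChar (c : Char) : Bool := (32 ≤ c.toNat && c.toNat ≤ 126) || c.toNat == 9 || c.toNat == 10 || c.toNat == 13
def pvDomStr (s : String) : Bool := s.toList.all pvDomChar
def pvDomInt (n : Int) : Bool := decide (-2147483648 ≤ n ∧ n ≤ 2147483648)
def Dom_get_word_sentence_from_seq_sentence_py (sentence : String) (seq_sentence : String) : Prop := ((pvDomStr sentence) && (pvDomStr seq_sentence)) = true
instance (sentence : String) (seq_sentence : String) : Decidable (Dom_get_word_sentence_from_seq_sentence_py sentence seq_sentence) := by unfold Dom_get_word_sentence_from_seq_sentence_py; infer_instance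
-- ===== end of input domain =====

-- B replaces A's per-character word accumulation by a two-phase pass (collect the 'B' boundary
-- indices first, then slice the sentence between consecutive boundaries); objective: alternative.

-- ===== PORT A =====
def get_word_sentence_from_seq_sentence_py (sentence : String) (seq_sentence : String) : List String :=
  -- assert len(sentence) == len(seq_sentence): covered by Pre_
  match sentence.toList with
  | [] => []
  | c :: _ =>
    let pairs := (PySem.List.slice sentence.toList (some 1) none).zip
                 (PySem.List.slice seq_sentence.toList (some 1) none)
    let r := pairs.foldl
      (fun (acc : List (List Char) × List Char) (p : Char × Char) =>
        let acc := if p.2 = 'B' then (acc.1 ++ [acc.2], ([] : List Char)) else acc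
        (acc.1, acc.2 ++ [p.1]))
      ([], [c])
    (r.1 ++ [r.2]).map String.ofList

-- ===== PORT B =====
def get_word_sentence_from_seq_sentence_py_alt (sentence : String) (seq_sentence : String) : List String :=
  -- assert len(sentence) == len(seq_sentence): covered by Pre_
  if sentence.toList = [] then []
  else
    let s := sentence.toList
    let n : Int := (s.length : Int)
    let cuts : List Int :=
      0 :: ((PySem.List.pyRange 1 n 1).filter
              (fun i => PySem.List.pyGet? seq_sentence.toList i == some 'B')) ++ [n]
    (PySem.List.pyRange 0 ((cuts.length : Int) - 1) 1).map
      (fun k => String.ofList (PySem.List.slice s (some (PySem.List.pyGetD cuts k 0))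
                                                 (some (PySem.List.pyGetD cuts (k + 1) 0))))

-- ===== PRECONDITION & SPEC =====
-- Pre_ excludes exactly the inputs of unequal length, on which A's assert raises AssertionError.
def Pre_get_word_sentence_from_seq_sentence_py (sentence : String) (seq_sentence : String) : Prop :=
  sentence.toList.length = seq_sentence.toList.length
instance (sentence : String) (seq_sentence : String) : Decidable (Pre_get_word_sentence_from_seq_sentence_py sentence seq_sentence) := by unfold Pre_get_word_sentence_from_seq_sentence_py; infer_instance
def pvWitness_get_word_sentence_from_seq_sentence_py : String × String := ("abcd", "BIBI")

def Spec_get_word_sentence_from_seq_sentence_py (sentence : String) (seq_sentence : String) (out : List String) : Prop := out = get_word_sentence_from_seq_sentence_py_alt sentence seq_sentence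
instance (sentence : String) (seq_sentence : String) (out : List String) : Decidable (Spec_get_word_sentence_from_seq_sentence_py sentence seq_sentence out) := by unfold Spec_get_word_sentence_from_seq_sentence_py; infer_instance

-- ===== CLAIM (what is proved, stated in full; the proofs are below) =====
def Claim_equal_get_word_sentence_from_seq_sentence_py : Prop := ∀ (sentence : String) (seq_sentence : String), Dom_get_word_sentence_from_seq_sentence_py sentence seq_sentence → Pre_get_word_sentence_from_seq_sentence_py sentence seq_sentence → Spec_get_word_sentence_from_seq_sentence_py sentence seq_sentence (get_word_sentence_from_seq_sentence_py sentence seq_sentence)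

-- ===== LEMMAS AND PROOFS =====


def segF : List Char → List (Char × Char) → List (List Char)
  | w, [] => [w]
  | w, (c, l) :: r => if l = 'B' then w :: segF [c] r else segF (w ++ [c]) r

def zipSlices (s : List Char) : List Nat → List (List Char)
  | [] => []
  | [_] => []
  | a :: b :: rest => ((s.drop a).take (b - a)) :: zipSlices s (b :: rest)

def posB : List Char → List Nat
  | [] => []
  | l :: u => (if l = 'B' then [0] else []) ++ (posB u).map (· + 1)

theorem map_add_add (l : List Nat) (a b : Nat) : (l.map (· + a)).map (· + b) = l.map (· + (a + b)) := by
  simp [List.map_map, Function.comp_def, Nat.add_assoc]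

theorem zipSlices_shift1 (cs : List Nat) (x : Char) (s : List Char) :
    zipSlices (x :: s) (cs.map (· + 1)) = zipSlices s cs := by
  induction cs with
  | nil => simp [zipSlices]
  | cons a cs ih =>
    cases cs with
    | nil => simp [zipSlices]
    | cons b rest =>
      simp only [List.map_cons] at ih ⊢
      simp only [zipSlices, ih]
      congr 2
      omega

theorem zipSlices_shift (w : List Char) (cs : List Nat) (s : List Char) :
    zipSlices (w ++ s) (cs.map (· + w.length)) = zipSlices s cs := by
  induction w with
  | nil => simp
  | cons x w ih =>
    have h : cs.map (· + (x :: w).length) = (cs.map (· + w.length)).map (· + 1) := by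
      rw [map_add_add]; simp
    rw [h, List.cons_append, zipSlices_shift1, ih]

theorem zipSlices_segF (u : List Char) : ∀ (t w : List Char), u.length = t.length →
    zipSlices (w ++ t) (0 :: ((posB u).map (· + w.length) ++ [w.length + t.length])) =
      segF w (t.zip u) := by
  induction u with
  | nil =>
    intro t w h
    obtain rfl : t = [] := by cases t <;> simp_all
    simp [zipSlices, segF, posB]
  | cons l u ih =>
    intro t w h
    obtain ⟨d, t, rfl⟩ : ∃ d t', t = d :: t' := by
      cases t with
      | nil => simp at h
      | cons d t' => exact ⟨d, t', rfl⟩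
    simp only [List.length_cons] at h
    by_cases hB : l = 'B'
    · subst hB
      have h1 : (posB ('B' :: u)).map (· + w.length)
          = w.length :: (posB u).map (· + (1 + w.length)) := by
        simp [posB]
      rw [h1, List.cons_append]
      simp only [zipSlices]
      rw [show ((w ++ d :: t).drop 0).take (w.length - 0) = w by simp]
      have h3 : (w.length :: ((posB u).map (· + (1 + w.length)) ++ [w.length + (d :: t).length]))
          = (0 :: ((posB u).map (· + 1) ++ [1 + t.length])).map (· + w.length) := by
        simp only [List.map_cons, List.map_append, map_add_add, Nat.zero_add, List.length_cons]
        congr 1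
        congr 1
        simp
        omega
      rw [h3, zipSlices_shift]
      have h4 := ih t [d] (by omega)
      simp only [List.length_singleton, List.singleton_append] at h4
      simp only [List.zip_cons_cons, segF]
      rw [h4]
      simp
    · have h1 : (posB (l :: u)).map (· + w.length)
          = (posB u).map (· + (w.length + 1)) := by
        simp [posB, hB]
        intro a _
        omega
      rw [h1]
      have h4 := ih t (w ++ [d]) (by omega)
      simp only [List.length_append, List.length_singleton] at h4
      simp only [List.zip_cons_cons, segF, if_neg hB]
      rw [show w.length + (d :: t).length = w.length + 1 + t.length by simp; omega,
          show w ++ d :: t = (w ++ [d]) ++ t by simp]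
      exact h4

theorem posB_filter (u : List Char) :
    (List.range u.length).filter (fun k => u[k]? == some 'B') = posB u := by
  induction u with
  | nil => simp [posB]
  | cons l u ih =>
    rw [List.length_cons, List.range_succ_eq_map, List.filter_cons]
    by_cases hB : l = 'B'
    · subst hB
      simp only [posB]
      simp only [List.getElem?_cons_zero, beq_self_eq_true, if_pos]
      congr 1
      rw [List.filter_map, ← ih]
      congr 1
    · simp only [posB, if_neg hB, List.nil_append]
      have : ((l :: u)[0]? == some 'B') = false := by simp [hB]
      rw [this]
      simp only [if_neg Bool.false_ne_true]
      rw [List.filter_map, ← ih]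
      congr 1

theorem C1 (l0 : Char) (u : List Char) :
    (PySem.List.pyRange 1 ((u.length : Int) + 1) 1).filter
        (fun i => PySem.List.pyGet? (l0 :: u) i == some 'B')
      = ((posB u).map (· + 1)).map (fun (a : Nat) => (a : Int)) := by
  rw [PySem.List.pyRange_one]
  rw [show ((u.length : Int) + 1 - 1).toNat = u.length by omega]
  rw [List.filter_map, ← posB_filter, List.map_map]
  have e1 : List.filter ((fun i => PySem.List.pyGet? (l0 :: u) i == some 'B') ∘ fun (k : Nat) => 1 + (k : Int))
        (List.range u.length) = List.filter (fun k => u[k]? == some 'B') (List.range u.length) := by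
    apply List.filter_congr
    intro k hk
    simp only [Function.comp_apply]
    rw [show (1 + (k : Int)) = ((k + 1 : Nat) : Int) by omega]
    rw [PySem.List.pyGet?_natCast]
    simp
  rw [e1]
  apply List.map_congr_left
  intro k _
  simp only [Function.comp_apply]
  omega

theorem C2' (cs : List Nat) (s : List Char) :
    (List.range (cs.length - 1)).map
        (fun k => (s.drop (cs.getD k 0)).take (cs.getD (k + 1) 0 - cs.getD k 0))
      = zipSlices s cs := by
  induction cs with
  | nil => simp [zipSlices]
  | cons a cs ih =>
    cases cs with
    | nil => simp [zipSlices]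
    | cons b rest =>
      rw [show (a :: b :: rest).length - 1 = rest.length + 1 by simp]
      rw [List.range_succ_eq_map, List.map_cons, List.map_map]
      simp only [zipSlices]
      congr 1

theorem foldA_segF (r : List (Char × Char)) (ws : List (List Char)) (w : List Char) :
    (r.foldl
      (fun (acc : List (List Char) × List Char) (p : Char × Char) =>
        let acc := if p.2 = 'B' then (acc.1 ++ [acc.2], ([] : List Char)) else acc
        (acc.1, acc.2 ++ [p.1]))
      (ws, w)).1 ++ [(r.foldl
      (fun (acc : List (List Char) × List Char) (p : Char × Char) =>
        let acc := if p.2 = 'B' then (acc.1 ++ [acc.2], ([] : List Char)) else acc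
        (acc.1, acc.2 ++ [p.1]))
      (ws, w)).2] = ws ++ segF w r := by
  induction r generalizing ws w with
  | nil => simp [segF]
  | cons p r ih =>
    obtain ⟨c, l⟩ := p
    by_cases hB : l = 'B' <;> simp [segF, hB, List.foldl_cons, ih]

theorem C2 (cs : List Nat) (s : List Char) :
    (PySem.List.pyRange 0 (((cs.map (fun (a : Nat) => (a : Int))).length : Int) - 1) 1).map
      (fun k => PySem.List.slice s (some (PySem.List.pyGetD (cs.map (fun (a : Nat) => (a : Int))) k 0))
                                   (some (PySem.List.pyGetD (cs.map (fun (a : Nat) => (a : Int))) (k + 1) 0)))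
    = zipSlices s cs := by
  rw [← C2', List.length_map, PySem.List.pyRange_one]
  rw [show (((cs.length : Int)) - 1 - 0).toNat = cs.length - 1 by omega]
  rw [List.map_map]
  apply List.map_congr_left
  intro k hk
  simp only [Function.comp_apply]
  rw [show ((0 : Int) + (k : Int)) = ((k : Nat) : Int) by omega]
  rw [show ((0 : Int)) = ((0 : Nat) : Int) by simp]
  rw [PySem.List.pyGetD_map, show (((k : Nat) : Int) + 1) = (((k + 1 : Nat)) : Int) by omega,
      PySem.List.pyGetD_map]
  simp only [PySem.List.pyGetD_natCast]
  rw [PySem.List.slice_natCast]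

theorem get_word_sentence_from_seq_sentence_py_spec : Claim_equal_get_word_sentence_from_seq_sentence_py := by
  unfold Claim_equal_get_word_sentence_from_seq_sentence_py
  intro sentence seq_sentence _ hpre
  unfold Spec_get_word_sentence_from_seq_sentence_py
  unfold Pre_get_word_sentence_from_seq_sentence_py at hpre
  unfold get_word_sentence_from_seq_sentence_py get_word_sentence_from_seq_sentence_py_alt
  cases hs : sentence.toList with
  | nil => simp
  | cons c t =>
    obtain ⟨l0, u, hq⟩ : ∃ l0 u, seq_sentence.toList = l0 :: u := by
      cases hq : seq_sentence.toList with
      | nil => rw [hs, hq] at hpre; simp at hpre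
      | cons l0 u => exact ⟨l0, u, rfl⟩
    have hlen : u.length = t.length := by
      rw [hs, hq] at hpre; simp at hpre; omega
    simp only [hq]
    rw [if_neg (by simp)]
    -- A side
    rw [PySem.List.slice_from_one, PySem.List.slice_from_one]
    simp only [List.tail_cons]
    have hA := foldA_segF (t.zip u) [] [c]
    -- B side
    have hcuts : (0 : Int) :: ((PySem.List.pyRange 1 ((c :: t).length : Int) 1).filter
              (fun i => PySem.List.pyGet? (l0 :: u) i == some 'B')) ++ [((c :: t).length : Int)]
        = ((0 : Nat) :: ((posB u).map (· + 1) ++ [u.length + 1])).map (fun (a : Nat) => (a : Int)) := by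
      rw [show (((c :: t).length : Nat) : Int) = ((u.length : Int) + 1) by simp [hlen]]
      rw [C1]
      simp
    rw [hcuts]
    have hB2 : (PySem.List.pyRange 0 (((((0 : Nat) :: ((posB u).map (· + 1) ++ [u.length + 1])).map (fun (a : Nat) => (a : Int))).length : Int) - 1) 1).map
        (fun k => String.ofList (PySem.List.slice (c :: t)
            (some (PySem.List.pyGetD (((0 : Nat) :: ((posB u).map (· + 1) ++ [u.length + 1])).map (fun (a : Nat) => (a : Int))) k 0))
            (some (PySem.List.pyGetD (((0 : Nat) :: ((posB u).map (· + 1) ++ [u.length + 1])).map (fun (a : Nat) => (a : Int))) (k + 1) 0))))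
        = (zipSlices (c :: t) ((0 : Nat) :: ((posB u).map (· + 1) ++ [u.length + 1]))).map String.ofList := by
      rw [← C2, List.map_map]
      rfl
    rw [hB2]
    have hseg := zipSlices_segF u t [c] hlen
    simp only [List.length_singleton, List.singleton_append] at hseg
    rw [show (0 : Nat) :: ((posB u).map (· + 1) ++ [u.length + 1])
          = 0 :: ((posB u).map (· + 1) ++ [1 + t.length]) by rw [hlen]; ring_nf]
    rw [hseg]
    rw [List.nil_append] at hA
    rw [← hA]
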